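-- pv_equiv track=rewrite | github.com/kpanapabusiness-droid/Forex-Backtester | analytics/phaseD6B_ignition_recall.py | _event_captured
-- ===== SOURCE A (Python) =====
-- def _event_captured(
--     event_start_date: str,
--     trigger_dates: list[str],
--     timeline: list[str],
--     capture_bars: int,
-- ) -> tuple[bool, str | None, int | None]:
--     """Return (captured, first_trigger_date, entry_delay_bars)."""
--     try:
--         start_idx = timeline.index(event_start_date)
--     except ValueError:
--         return False, None, None
--     window = timeline[start_idx : start_idx + capture_bars]
--     for i, d in enumerate(window):
--         if d in trigger_dates:
--             return True, d, i
--     return False, None, None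
-- ===== SOURCE B (Python) =====
-- def _event_captured(
--     event_start_date: str,
--     trigger_dates: list[str],
--     timeline: list[str],
--     capture_bars: int,
-- ) -> tuple[bool, str | None, int | None]:
--     """Return (captured, first_trigger_date, entry_delay_bars)."""
--     if event_start_date not in timeline:
--         return False, None, None
--     start_idx = timeline.index(event_start_date)
--     window = timeline[start_idx : start_idx + capture_bars]
--     first_pos = {}
--     for i, d in enumerate(window):
--         if d not in first_pos:
--             first_pos[d] = i
--     hits = [first_pos[t] for t in trigger_dates if t in first_pos]
--     if not hits:
--         return False, None, None
--     m = min(hits)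
--     return True, window[m], m
-- ===== Notes on version B (the rewrite author's own statement) =====
-- stated objective: alternative
-- what changed: Replaces A's per-bar scan with a repeated inner membership test in trigger_dates by a single pass over the window building a first-occurrence position dict, then one pass over trigger_dates collecting positions and taking the minimum.
import Mathlib
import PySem

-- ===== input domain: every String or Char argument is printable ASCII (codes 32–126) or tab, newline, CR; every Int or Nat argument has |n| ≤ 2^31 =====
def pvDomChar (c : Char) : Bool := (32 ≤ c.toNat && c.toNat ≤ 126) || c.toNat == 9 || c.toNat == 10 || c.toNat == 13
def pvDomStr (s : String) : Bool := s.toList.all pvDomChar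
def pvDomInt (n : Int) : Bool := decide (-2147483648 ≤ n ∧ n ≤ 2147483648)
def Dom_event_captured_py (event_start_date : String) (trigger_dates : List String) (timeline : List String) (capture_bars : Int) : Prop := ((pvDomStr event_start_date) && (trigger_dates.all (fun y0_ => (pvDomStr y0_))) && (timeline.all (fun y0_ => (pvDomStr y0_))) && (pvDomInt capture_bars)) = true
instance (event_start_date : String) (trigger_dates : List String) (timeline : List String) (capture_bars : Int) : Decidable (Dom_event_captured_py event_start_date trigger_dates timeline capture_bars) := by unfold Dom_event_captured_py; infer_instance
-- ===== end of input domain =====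

-- B builds a first-occurrence position dict over the window in one pass and takes the minimum
-- position among trigger dates, instead of A's per-bar scan with an inner membership test (objective: alternative).

-- ===== PORT A =====
-- the 'for i, d in enumerate(window)' loop of A, with its running index
def ecScanA (trigger_dates : List String) : List String → Int → Bool × Option String × Option Int
  | [], _ => (false, none, none)
  | d :: rest, i =>
    if trigger_dates.contains d then (true, some d, some i)
    else ecScanA trigger_dates rest (i + 1)

def event_captured_py (event_start_date : String) (trigger_dates : List String) (timeline : List String) (capture_bars : Int) : Bool × Option String × Option Int :=
  match PySem.List.index? timeline event_start_date with
  | none => (false, none, none)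
  | some start_idx =>
      let window := PySem.List.slice timeline (some (start_idx : Int)) (some ((start_idx : Int) + capture_bars))
      ecScanA trigger_dates window 0

-- ===== PORT B =====
-- the 'for i, d in enumerate(window): if d not in first_pos: first_pos[d] = i' loop of B
def ecFirstPos (window : List String) : PySem.Dict String Int :=
  (PySem.List.enumerate window 0).foldl
    (fun d p => if d.contains p.2 then d else d.insert p.2 p.1) PySem.Dict.empty

def event_captured_py_alt (event_start_date : String) (trigger_dates : List String) (timeline : List String) (capture_bars : Int) : Bool × Option String × Option Int :=
  if !timeline.contains event_start_date then (false, none, none)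
  else
    match PySem.List.index? timeline event_start_date with
    | none => (false, none, none)  -- unreachable: index never raises after the membership guard
    | some start_idx =>
        let window := PySem.List.slice timeline (some (start_idx : Int)) (some ((start_idx : Int) + capture_bars))
        let firstPos := ecFirstPos window
        let hits := trigger_dates.filterMap (fun t => firstPos.get? t)
        match PySem.List.min? hits (fun x => x) with
        | none => (false, none, none)
        -- m is always a first-occurrence position inside window, so window[m] never raises: pyGet? is some here
        | some m => (true, PySem.List.pyGet? window m, some m)

-- ===== PRECONDITION & SPEC =====
def Spec_event_captured_py (event_start_date : String) (trigger_dates : List String) (timeline : List String) (capture_bars : Int) (out : Bool × Option String × Option Int) : Prop := out = event_captured_py_alt event_start_date trigger_dates timeline capture_bars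
instance (event_start_date : String) (trigger_dates : List String) (timeline : List String) (capture_bars : Int) (out : Bool × Option String × Option Int) : Decidable (Spec_event_captured_py event_start_date trigger_dates timeline capture_bars out) := by unfold Spec_event_captured_py; infer_instance

-- ===== CLAIM (what is proved, stated in full; the proofs are below) =====
def Claim_equal_event_captured_py : Prop := ∀ (event_start_date : String) (trigger_dates : List String) (timeline : List String) (capture_bars : Int), Dom_event_captured_py event_start_date trigger_dates timeline capture_bars → Spec_event_captured_py event_start_date trigger_dates timeline capture_bars (event_captured_py event_start_date trigger_dates timeline capture_bars)

-- ===== LEMMAS AND PROOFS =====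

-- B's dict holds, for each date, s + (its first index in w)
lemma ec_fold_get (w : List String) : ∀ (s : Int) (d : PySem.Dict String Int) (t : String),
    ((PySem.List.enumerate w s).foldl (fun d p => if d.contains p.2 then d else d.insert p.2 p.1) d).get? t
      = ((d.get? t).orElse (fun _ => (PySem.List.index? w t).map (fun k : Nat => s + k))) := by
  induction w with
  | nil =>
      intro s d t
      rw [PySem.List.enumerate_nil, List.foldl_nil]
      cases d.get? t <;> simp [Option.orElse]
  | cons x w ih =>
      intro s d t
      rw [PySem.List.enumerate_cons, List.foldl_cons, ih]
      by_cases hx : x = t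
      · subst hx
        by_cases hc : d.contains x
        · simp only [hc, if_true]
          have hs : (d.get? x).isSome := by
            rw [← PySem.Dict.contains_eq_isSome_get?]; exact hc
          cases h : d.get? x with
          | none => rw [h] at hs; simp at hs
          | some v => simp [Option.orElse]
        · have hn : d.get? x = none := by
            rw [PySem.Dict.get?_eq_none_iff_contains]
            simpa using hc
          rw [if_neg hc, PySem.Dict.get?_insert_self, hn, PySem.List.index?_cons_self]
          simp [Option.orElse]
      · have hstep : (if d.contains x then d else d.insert x s).get? t = d.get? t := by
          split
          · rfl
          · exact PySem.Dict.get?_insert_of_ne d s (fun h => hx h.symm)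
        rw [hstep, PySem.List.index?_cons_of_ne _ hx]
        cases d.get? t with
        | some v => simp [Option.orElse]
        | none =>
            cases PySem.List.index? w t with
            | none => simp [Option.orElse]
            | some k =>
                simp only [Option.map_some, Option.orElse]
                congr 1
                push_cast
                ring

-- every hit is ≥ the offset s
lemma ec_hit_ge (T : List String) (w : List String) (s : Int) (y : Int)
    (hy : y ∈ T.filterMap (fun t => (PySem.List.index? w t).map (fun k : Nat => s + k))) : s ≤ y := by
  rcases List.mem_filterMap.mp hy with ⟨t, _, ht⟩
  rcases Option.map_eq_some_iff.mp ht with ⟨k, _, hk⟩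
  omega

-- A's scan equals B's min-of-first-positions computation, for any offset s
lemma ec_scan_eq_min (T : List String) (w : List String) : ∀ (s : Int),
    ecScanA T w s
      = (match PySem.List.min? (T.filterMap (fun t => (PySem.List.index? w t).map (fun k : Nat => s + k))) (fun x => x) with
         | none => (false, none, none)
         | some m => (true, PySem.List.pyGet? w (m - s), some m)) := by
  induction w with
  | nil =>
      intro s
      have h : T.filterMap (fun t => (PySem.List.index? ([] : List String) t).map (fun k : Nat => s + k)) = [] := by
        simp [PySem.List.index?_eq_idxOf?]
      rw [h]
      simp [ecScanA, PySem.List.min?]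
  | cons x w ih =>
      intro s
      by_cases hT : T.contains x
      · have hxT : x ∈ T := by simpa using hT
        have hsmem : s ∈ T.filterMap (fun t => (PySem.List.index? (x :: w) t).map (fun k : Nat => s + k)) := by
          refine List.mem_filterMap.mpr ⟨x, hxT, ?_⟩
          rw [PySem.List.index?_cons_self]
          simp
        cases hmin : PySem.List.min? (T.filterMap (fun t => (PySem.List.index? (x :: w) t).map (fun k : Nat => s + k))) (fun x => x) with
        | none =>
            rw [PySem.List.min?_eq_none_iff] at hmin
            rw [hmin] at hsmem
            simp at hsmem
        | some m =>
            have h1 : s ≤ m := ec_hit_ge T (x :: w) s m (PySem.List.min?_mem hmin)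
            have h2 : m ≤ s := PySem.List.min?_isMin hmin s hsmem
            have hms : m = s := le_antisymm h2 h1
            simp only [hms]
            simp [ecScanA, hxT]
      · have hne : ∀ t ∈ T, t ≠ x := by
          intro t ht h; subst h; exact hT (by simpa using ht)
        have hcong : T.filterMap (fun t => (PySem.List.index? (x :: w) t).map (fun k : Nat => s + k))
            = T.filterMap (fun t => (PySem.List.index? w t).map (fun k : Nat => (s + 1) + k)) := by
          apply List.filterMap_congr
          intro t ht
          rw [PySem.List.index?_cons_of_ne _ (fun h => (hne t ht) h.symm)]
          cases h2 : PySem.List.index? w t with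
          | none => simp
          | some k => simp only [Option.map_some]; congr 1; push_cast; ring
        have hxnT : x ∉ T := by simpa using hT
        have hA : ecScanA T (x :: w) s = ecScanA T w (s + 1) := by
          simp [ecScanA, hxnT]
        rw [hA, ih (s + 1), hcong]
        cases hmin : PySem.List.min? (T.filterMap (fun t => (PySem.List.index? w t).map (fun k : Nat => (s + 1) + k))) (fun x => x) with
        | none => rfl
        | some m =>
            have hm := PySem.List.min?_mem hmin
            rcases List.mem_filterMap.mp hm with ⟨t, _, ht⟩
            rcases Option.map_eq_some_iff.mp ht with ⟨k, _, hk⟩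
            have h1 : m - (s + 1) = (k : Int) := by omega
            have h2 : m - s = (k : Int) + 1 := by omega
            simp only [h1, h2, PySem.List.pyGet?_cons_succ]

-- B's hits list is exactly the offset-0 first-position list of the scan lemma
lemma ec_hits_eq (T : List String) (w : List String) :
    T.filterMap (fun t => (ecFirstPos w).get? t)
      = T.filterMap (fun t => (PySem.List.index? w t).map (fun k : Nat => (0 : Int) + k)) := by
  apply List.filterMap_congr
  intro t _
  rw [ecFirstPos, ec_fold_get w 0 PySem.Dict.empty t]
  simp [Option.orElse]

-- ===== VERDICT (by name: the statement is the Claim_ definition above) =====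
theorem event_captured_py_spec : Claim_equal_event_captured_py := by
  intro esd T tl cb _
  unfold Spec_event_captured_py event_captured_py event_captured_py_alt
  cases h : PySem.List.index? tl esd with
  | none =>
      have hc : tl.contains esd = false := by
        rw [PySem.List.index?_eq_idxOf?] at h
        simp_all
      simp
  | some start_idx =>
      have hc : tl.contains esd = true := by
        obtain ⟨hk, hx, -⟩ := PySem.List.getElem_of_index?_eq_some h
        have : esd ∈ tl := hx ▸ List.getElem_mem hk
        simpa using this
      simp only [hc, Bool.not_true, Bool.false_eq_true, if_false]
      rw [ec_scan_eq_min T _ 0, ec_hits_eq]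
      simp
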